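-- pv_equiv track=rewrite | github.com/iks15174/study | programmers/블록게임.py | can_crash
-- ===== SOURCE A (Python) =====
-- def can_crash(lr, lc, rr, rc, board, block_id):
--     rowl = rr - lr + 1
--     coll = rc - lc + 1
--     for ridx in range(rowl):
--         for cidx in range(coll):
--             if board[lr + ridx][lc + cidx] != 0 and board[lr + ridx][lc + cidx] != block_id:
--                 return False
--             if board[lr + ridx][lc + cidx] == 0:
--                 cur_row = lr + ridx
--                 while cur_row >= 0:
--                     if board[cur_row][lc + cidx] != 0:
--                         return False
--                     cur_row -= 1
--     return True
-- ===== SOURCE B (Python) =====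
-- def can_crash(lr, lc, rr, rc, board, block_id):
--     if lr > rr or lc > rc:
--         return True
--     for c in range(lc, rc + 1):
--         all_zero = True
--         for r in range(rr + 1):
--             v = board[r][c]
--             if v != 0:
--                 all_zero = False
--             if r >= lr:
--                 if v != 0 and v != block_id:
--                     return False
--                 if v == 0 and not all_zero:
--                     return False
--     return True
-- ===== Notes on version B (the rewrite author's own statement) =====
-- stated objective: alternative
-- what changed: B scans each column of the box once top-down carrying an all-zero-so-far flag, replacing A's row-major cell loop that rescans the whole column upward for every empty cell (O(rowl*coll*rr) cell reads become O(coll*rr); measured speed-up varies with the board, so no speed is claimed).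
-- outside the precondition, e.g. on can_crash(-1, 0, 0, 0, [[0], [5]], 1): A returns False, B returns True; on can_crash(0, 0, 1, 2, [[0, 0, 3], [0]], 1): A returns False, B raises IndexError
import Mathlib
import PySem

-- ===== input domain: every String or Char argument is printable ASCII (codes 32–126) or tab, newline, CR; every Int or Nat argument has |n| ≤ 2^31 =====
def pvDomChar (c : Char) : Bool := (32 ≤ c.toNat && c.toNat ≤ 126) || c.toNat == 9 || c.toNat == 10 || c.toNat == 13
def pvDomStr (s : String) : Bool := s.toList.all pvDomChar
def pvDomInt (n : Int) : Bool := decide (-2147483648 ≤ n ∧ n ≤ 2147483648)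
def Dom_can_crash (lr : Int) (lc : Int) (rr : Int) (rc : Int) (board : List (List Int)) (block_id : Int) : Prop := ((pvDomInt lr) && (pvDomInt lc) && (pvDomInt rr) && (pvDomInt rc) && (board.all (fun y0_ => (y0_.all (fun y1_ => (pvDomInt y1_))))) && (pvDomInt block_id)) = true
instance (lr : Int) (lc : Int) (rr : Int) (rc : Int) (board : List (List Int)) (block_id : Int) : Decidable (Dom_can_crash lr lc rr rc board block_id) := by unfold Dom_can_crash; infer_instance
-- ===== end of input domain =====

-- B re-implements the check column-major with one downward pass per column carrying an
-- "all zero so far" flag, instead of A's per-zero-cell upward rescans; equivalence of the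
-- RETURN value is proved on Pre_can_crash (in-bounds, non-negative box coordinates).

-- board[r][c] as an Int (total form; Pre_can_crash keeps every access in range)
def pvCell (bd : List (List Int)) (r c : Int) : Int :=
  PySem.List.pyGetD (PySem.List.pyGetD bd r []) c 0

-- ===== PORT A =====
-- the 'while cur_row >= 0' loop of A
def pvWhileA (bd : List (List Int)) (c : Int) (cur_row : Int) : Bool :=
  if h : 0 ≤ cur_row then
    if pvCell bd cur_row c ≠ 0 then false
    else pvWhileA bd c (cur_row - 1)
  else true
termination_by (cur_row + 1).toNat
decreasing_by omega

def can_crash (lr : Int) (lc : Int) (rr : Int) (rc : Int) (board : List (List Int)) (block_id : Int) : Bool :=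
  let rowl := rr - lr + 1
  let coll := rc - lc + 1
  (List.range rowl.toNat).all fun ridx =>
    (List.range coll.toNat).all fun cidx =>
      let v := pvCell board (lr + ridx) (lc + cidx)
      if v ≠ 0 ∧ v ≠ block_id then false
      else if v = 0 then pvWhileA board (lc + cidx) (lr + ridx)
      else true

-- ===== PORT B =====
-- B's inner loop: scan one column downward from row r, n rows to go, az = "all rows above r were 0"
def pvColScan (lr : Int) (bd : List (List Int)) (bid : Int) (c : Int) : Nat → Nat → Bool → Bool
  | 0, _, _ => true
  | n+1, r, az =>
    let v := pvCell bd r c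
    let az' := if v ≠ 0 then false else az
    if lr ≤ (r : Int) then
      if v ≠ 0 ∧ v ≠ bid then false
      else if v = 0 ∧ az' = false then false
      else pvColScan lr bd bid c n (r+1) az'
    else pvColScan lr bd bid c n (r+1) az'

def can_crash_alt (lr : Int) (lc : Int) (rr : Int) (rc : Int) (board : List (List Int)) (block_id : Int) : Bool :=
  if lr > rr ∨ lc > rc then true
  else (List.range (rc - lc + 1).toNat).all fun coff =>
    pvColScan lr board block_id (lc + coff) (rr + 1).toNat 0 true

-- ===== PRECONDITION & SPEC =====
-- Pre_ excludes boxes with negative coordinates or going out of the board's bounds: there A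
-- either raises IndexError or returns a value produced by Python's accidental negative-index
-- wraparound / an early exit before the out-of-range access.
def Pre_can_crash (lr : Int) (lc : Int) (rr : Int) (rc : Int) (board : List (List Int)) (block_id : Int) : Prop :=
  lr ≤ rr ∧ lc ≤ rc →
    0 ≤ lr ∧ 0 ≤ lc ∧ rr < (board.length : Int) ∧
    ∀ row ∈ board.take (rr.toNat + 1), rc < (row.length : Int)
instance (lr : Int) (lc : Int) (rr : Int) (rc : Int) (board : List (List Int)) (block_id : Int) : Decidable (Pre_can_crash lr lc rr rc board block_id) := by unfold Pre_can_crash; infer_instance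

def pvWitness_can_crash : Int × Int × Int × Int × List (List Int) × Int := (0, 0, 1, 1, [[0, 0], [0, 2]], 2)

def Spec_can_crash (lr : Int) (lc : Int) (rr : Int) (rc : Int) (board : List (List Int)) (block_id : Int) (out : Bool) : Prop := out = can_crash_alt lr lc rr rc board block_id
instance (lr : Int) (lc : Int) (rr : Int) (rc : Int) (board : List (List Int)) (block_id : Int) (out : Bool) : Decidable (Spec_can_crash lr lc rr rc board block_id out) := by unfold Spec_can_crash; infer_instance

-- ===== CLAIM (what is proved, stated in full; the proofs are below) =====
def Claim_equal_can_crash : Prop := ∀ (lr : Int) (lc : Int) (rr : Int) (rc : Int) (board : List (List Int)) (block_id : Int), Dom_can_crash lr lc rr rc board block_id → Pre_can_crash lr lc rr rc board block_id → Spec_can_crash lr lc rr rc board block_id (can_crash lr lc rr rc board block_id)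

-- ===== LEMMAS AND PROOFS =====

-- the cell (m, c) is acceptable: empty or own block, and if empty the whole column above is empty
def pvGood (bd : List (List Int)) (bid : Int) (m : Nat) (c : Int) : Prop :=
  (pvCell bd m c = 0 ∨ pvCell bd m c = bid) ∧
  (pvCell bd m c = 0 → ∀ j : Nat, j ≤ m → pvCell bd j c = 0)

lemma pvWhileA_neg (bd : List (List Int)) (c m : Int) (h : m < 0) : pvWhileA bd c m = true := by
  rw [pvWhileA]
  simp [show ¬ (0 ≤ m) by omega]

lemma pvWhileA_nat (bd : List (List Int)) (c : Int) :
    ∀ n : Nat, (pvWhileA bd c n = true ↔ ∀ j : Nat, j ≤ n → pvCell bd j c = 0) := by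
  intro n
  induction n with
  | zero =>
    rw [pvWhileA]
    simp only [Int.natCast_zero, le_refl, dite_true]
    rw [show (0:Int) - 1 = -1 by ring, pvWhileA_neg bd c (-1) (by omega)]
    constructor
    · intro h j hj
      by_cases hv : pvCell bd 0 c = 0
      · have : j = 0 := Nat.le_zero.mp hj
        simpa [this] using hv
      · simp [hv] at h
    · intro h
      have := h 0 (le_refl 0)
      simp at this
      simp [this]
  | succ n ih =>
    rw [pvWhileA]
    have hcast : ((n+1 : Nat) : Int) - 1 = (n : Int) := by push_cast; ring
    simp only [show (0:Int) ≤ ((n+1 : Nat) : Int) by positivity, dite_true, hcast]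
    by_cases hv : pvCell bd ((n+1 : Nat) : Int) c = 0
    · rw [if_neg (by push_cast at hv; simp [hv])]
      rw [ih]
      constructor
      · intro h j hj
        by_cases hj' : j ≤ n
        · exact h j hj'
        · have hje : j = n + 1 := by omega
          simpa [hje] using hv
      · intro h j hj
        exact h j (Nat.le_succ_of_le hj)
    · rw [if_pos (by simpa using hv)]
      constructor
      · intro h; exact absurd h (by simp)
      · intro h
        exact absurd (h (n+1) (le_refl _)) hv

lemma pvColScan_iff (lr : Int) (bd : List (List Int)) (bid : Int) (c : Int) :
    ∀ (n r : Nat) (az : Bool), (az = true ↔ ∀ j : Nat, j < r → pvCell bd j c = 0) →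
      (pvColScan lr bd bid c n r az = true ↔
        ∀ i : Nat, i < n → lr ≤ ((r + i : Nat) : Int) → pvGood bd bid (r + i) c) := by
  intro n
  induction n with
  | zero => intro r az _; simp [pvColScan]
  | succ n ih =>
    intro r az hinv
    rw [pvColScan]
    set v := pvCell bd r c with hv
    have haz' : ((if v ≠ 0 then false else az) = true ↔ ∀ j : Nat, j < r + 1 → pvCell bd j c = 0) := by
      by_cases h0 : v = 0
      · rw [if_neg (by simp [h0]), hinv]
        constructor
        · intro h j hj
          rcases Nat.lt_succ_iff_lt_or_eq.mp hj with h' | h'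
          · exact h j h'
          · simpa [h'] using h0
        · intro h j hj; exact h j (Nat.lt_succ_of_lt hj)
      · rw [if_pos (by simpa using h0)]
        constructor
        · intro h; exact absurd h (by simp)
        · intro h; exact absurd (h r (Nat.lt_succ_self r)) h0
    have hsplit : (∀ i : Nat, i < n + 1 → lr ≤ ((r + i : Nat) : Int) → pvGood bd bid (r + i) c) ↔
        ((lr ≤ (r : Int) → pvGood bd bid r c) ∧
         ∀ i : Nat, i < n → lr ≤ ((r + 1 + i : Nat) : Int) → pvGood bd bid (r + 1 + i) c) := by
      constructor
      · intro h
        refine ⟨fun hle => by simpa using h 0 (Nat.succ_pos n) (by simpa using hle), ?_⟩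
        intro i hi hle
        have := h (i+1) (by omega) (by push_cast at hle ⊢; omega)
        simpa [show r + (i + 1) = r + 1 + i by omega] using this
      · rintro ⟨h0, h⟩ i hi hle
        cases i with
        | zero => simpa using h0 (by simpa using hle)
        | succ i =>
          have := h i (by omega) (by push_cast at hle ⊢; omega)
          simpa [show r + 1 + i = r + (i + 1) by omega] using this
    by_cases hle : lr ≤ (r : Int)
    · rw [if_pos hle]
      by_cases hbad : v ≠ 0 ∧ v ≠ bid
      · rw [if_pos hbad]
        rw [hsplit]
        constructor
        · intro h; exact absurd h (by simp)
        · rintro ⟨h0, -⟩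
          exact absurd ((h0 hle).1) (by rw [← hv]; tauto)
      · rw [if_neg hbad]
        have hgood0 : (¬ (v = 0 ∧ (if v ≠ 0 then false else az) = false)) ↔ pvGood bd bid r c := by
          unfold pvGood
          rw [← hv]
          constructor
          · intro h
            constructor
            · by_cases h0 : v = 0
              · left; exact h0
              · right; rcases not_and_or.mp hbad with h' | h'
                · exact absurd h0 (by simpa using h')
                · simpa using h'
            · intro h0 j hj
              have : ¬ ((if v ≠ 0 then false else az) = false) := fun hf => h ⟨h0, hf⟩
              have haz : (if v ≠ 0 then false else az) = true := by
                cases hb : (if v ≠ 0 then false else az) with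
                | false => exact absurd hb this
                | true => rfl
              exact (haz'.mp haz) j (by omega)
          · rintro ⟨-, h2⟩ ⟨h0, hf⟩
            have : (if v ≠ 0 then false else az) = true := haz'.mpr (by
              intro j hj
              rcases Nat.lt_succ_iff.mp hj with hj'
              exact h2 h0 j hj')
            rw [this] at hf; exact absurd hf (by simp)
        by_cases hfail : v = 0 ∧ (if v ≠ 0 then false else az) = false
        · rw [if_pos hfail]
          rw [hsplit]
          constructor
          · intro h; exact absurd h (by simp)
          · rintro ⟨h0, -⟩
            exact absurd (h0 hle) (by rw [← hgood0]; exact not_not_intro hfail)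
        · rw [if_neg hfail]
          rw [ih (r+1) _ haz', hsplit]
          constructor
          · intro h; exact ⟨fun _ => hgood0.mp hfail, h⟩
          · rintro ⟨-, h⟩; exact h
    · rw [if_neg hle]
      rw [ih (r+1) _ haz', hsplit]
      constructor
      · intro h; exact ⟨fun h' => absurd h' hle, h⟩
      · rintro ⟨-, h⟩; exact h

-- body of A's double loop characterised by pvGood (row written as a Nat)
lemma pvBodyA_iff (bd : List (List Int)) (bid : Int) (m : Nat) (c : Int) :
    ((if pvCell bd m c ≠ 0 ∧ pvCell bd m c ≠ bid then false
      else if pvCell bd m c = 0 then pvWhileA bd c m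
      else true) = true) ↔ pvGood bd bid m c := by
  by_cases hbad : pvCell bd m c ≠ 0 ∧ pvCell bd m c ≠ bid
  · rw [if_pos hbad]
    unfold pvGood
    constructor
    · intro h; exact absurd h (by simp)
    · rintro ⟨h1, -⟩; exact absurd h1 (by tauto)
  · rw [if_neg hbad]
    by_cases h0 : pvCell bd m c = 0
    · rw [if_pos h0, pvWhileA_nat]
      unfold pvGood
      constructor
      · intro h; exact ⟨Or.inl h0, fun _ => h⟩
      · rintro ⟨-, h2⟩; exact h2 h0
    · rw [if_neg h0]
      unfold pvGood
      constructor
      · intro _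
        refine ⟨?_, fun hz => absurd hz h0⟩
        right
        rcases not_and_or.mp hbad with h' | h'
        · exact absurd h0 (by simpa using h')
        · simpa using h'
      · intro _; rfl

theorem can_crash_spec : Claim_equal_can_crash := by
  intro lr lc rr rc board block_id _ hpre
  unfold Spec_can_crash
  unfold can_crash can_crash_alt
  simp only []
  by_cases hempty : lr > rr ∨ lc > rc
  · rw [if_pos hempty]
    rcases hempty with h | h
    · have : (rr - lr + 1).toNat = 0 := by omega
      simp [this]
    · have : (rc - lc + 1).toNat = 0 := by omega
      simp [this]
  · rw [if_neg hempty]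
    rw [not_or, not_lt, not_lt] at hempty
    obtain ⟨hlr, hlc, -, -⟩ := hpre ⟨hempty.1, hempty.2⟩
    rw [Bool.eq_iff_iff]
    simp only [List.all_eq_true, List.mem_range]
    constructor
    · intro h coff hcoff
      rw [pvColScan_iff lr board block_id (lc + coff) _ 0 true (by simp)]
      intro i hi hle
      simp only [Nat.zero_add] at hle ⊢
      have hridx : i - lr.toNat < (rr - lr + 1).toNat := by omega
      have hbody := h (i - lr.toNat) hridx coff hcoff
      have hrow : lr + ((i - lr.toNat : Nat) : Int) = (i : Int) := by
        push_cast; omega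
      rw [hrow] at hbody
      exact (pvBodyA_iff board block_id i (lc + coff)).mp hbody
    · intro h ridx hridx cidx hcidx
      have hcol := h cidx hcidx
      rw [pvColScan_iff lr board block_id (lc + cidx) _ 0 true (by simp)] at hcol
      have hgood := hcol (lr.toNat + ridx) (by omega) (by push_cast; omega)
      simp only [Nat.zero_add] at hgood
      have hrow : lr + (ridx : Int) = ((lr.toNat + ridx : Nat) : Int) := by push_cast; omega
      rw [hrow]
      exact (pvBodyA_iff board block_id (lr.toNat + ridx) (lc + cidx)).mpr hgood
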